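-- pv_equiv track=rewrite | github.com/lucioeduardo/competitive-codes | 2018/Seletiva UDESC/J.py | leftZero
-- ===== SOURCE A (Python) =====
-- def leftZero(expr):
-- 	op = '+-*='
--
-- 	size = len(expr)-1
-- 	i = 1
--
-- 	while i < size:
--
-- 		if expr[i + 1] in op:
-- 			i += 1
-- 			continue
-- 		if expr[i] == '0' and expr[i-1] in op:
-- 			expr = expr[:i] + expr[i+1:]
-- 			size = size-1
-- 			continue
-- 		i += 1
-- 	return expr
-- ===== SOURCE B (Python) =====
-- def leftZero(expr):
--     ops = '+-*='
--     out = []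
--     i = 0
--     n = len(expr)
--     while i < n:
--         c = expr[i]
--         out.append(c)
--         if c in ops:
--             j = i + 1
--             while j < n and expr[j] == '0':
--                 j += 1
--             if j < n and expr[j] not in ops:
--                 pass            # whole zero run dropped
--             elif j > i + 1:
--                 out.append('0') # all-zero run: keep a single zero
--             i = j
--         else:
--             i += 1
--     return ''.join(out)
-- ===== Notes on version B (the rewrite author's own statement) =====
-- stated objective: simpler
-- what changed: A repeatedly deletes one character at a time from the string in place, re-scanning with index bookkeeping (size/i) after each deletion; B makes a single forward pass that copies characters into an output buffer and, after each operator, jumps over a whole run of zeros at once (keeping one '0' if the run is not followed by a digit-like character).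
import Mathlib
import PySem

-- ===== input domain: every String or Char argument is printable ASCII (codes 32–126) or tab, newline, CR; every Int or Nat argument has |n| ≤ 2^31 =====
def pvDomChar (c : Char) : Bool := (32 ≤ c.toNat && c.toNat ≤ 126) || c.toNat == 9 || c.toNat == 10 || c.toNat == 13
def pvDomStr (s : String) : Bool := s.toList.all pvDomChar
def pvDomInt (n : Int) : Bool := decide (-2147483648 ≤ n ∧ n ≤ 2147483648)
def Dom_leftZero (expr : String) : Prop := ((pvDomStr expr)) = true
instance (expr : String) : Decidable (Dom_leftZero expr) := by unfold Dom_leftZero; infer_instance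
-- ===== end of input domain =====

-- B rebuilds the string in one forward pass over runs of zeros instead of A's repeated
-- in-place single-character deletions (objective: simpler; same return value).

-- ===== PORT A =====

-- membership test 'c in "+-*="'
def isOp (c : Char) : Bool := c == '+' || c == '-' || c == '*' || c == '='

-- A's while loop: state (expr, size, i); deletes one char of expr at a time
def leftZeroLoop (expr : List Char) (size i : Int) : List Char :=
  if _h : i < size then
    if ((PySem.List.pyGet? expr (i+1)).map isOp).getD false then
      leftZeroLoop expr size (i+1)
    else if (PySem.List.pyGet? expr i == some '0')
            && ((PySem.List.pyGet? expr (i-1)).map isOp).getD false then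
      leftZeroLoop (PySem.List.slice expr none (some i) ++ PySem.List.slice expr (some (i+1)) none)
        (size - 1) i
    else
      leftZeroLoop expr size (i+1)
  else expr
termination_by (size - i).toNat
decreasing_by all_goals omega

def leftZero (expr : String) : String :=
  String.ofList (leftZeroLoop expr.toList (PySem.Str.len expr - 1) 1)

-- ===== PORT B =====

-- B's inner while loop: advance j past a run of '0' characters
def skipZeros (expr : List Char) (n j : Int) : Int :=
  if _h : j < n then
    if PySem.List.pyGet? expr j == some '0' then skipZeros expr n (j+1) else j
  else j
termination_by (n - j).toNat
decreasing_by omega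

-- needed by altLoop's termination proof
theorem skipZeros_le (expr : List Char) (n j : Int) : j ≤ skipZeros expr n j := by
  fun_induction skipZeros expr n j with
  | case1 j h hz ih => omega
  | case2 j h hz => omega
  | case3 j h => omega

-- B's outer while loop: builds the output list 'out' left to right
def altLoop (expr : List Char) (n i : Int) (out : List Char) : List Char :=
  if _h : i < n then
    let c := (PySem.List.pyGet? expr i).getD ' '
    let out' := out ++ [c]
    if isOp c then
      let j := skipZeros expr n (i+1)
      if decide (j < n) && !(((PySem.List.pyGet? expr j).map isOp).getD true) then
        altLoop expr n j out'
      else if i + 1 < j then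
        altLoop expr n j (out' ++ ['0'])
      else
        altLoop expr n j out'
    else
      altLoop expr n (i+1) out'
  else out
termination_by (n - i).toNat
decreasing_by
  · have := skipZeros_le expr n (i+1); omega
  · have := skipZeros_le expr n (i+1); omega
  · have := skipZeros_le expr n (i+1); omega
  · omega

def leftZero_alt (expr : String) : String :=
  String.ofList (altLoop expr.toList (PySem.Str.len expr) 0 [])

-- ===== PRECONDITION & SPEC =====
def Spec_leftZero (expr : String) (out : String) : Prop := out = leftZero_alt expr
instance (expr : String) (out : String) : Decidable (Spec_leftZero expr out) := by unfold Spec_leftZero; infer_instance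

-- ===== CLAIM (what is proved, stated in full; the proofs are below) =====
def Claim_equal_leftZero : Prop := ∀ (expr : String), Dom_leftZero expr → Spec_leftZero expr (leftZero expr)

-- ===== LEMMAS AND PROOFS =====

-- common normal form of both loops: a '0' is deleted exactly when the previous kept
-- char is an operator and a next char exists that is not an operator
def nextNonOp : List Char → Bool
  | d :: _ => !isOp d
  | [] => false

def gNorm (p : Bool) : List Char → List Char
  | [] => []
  | c :: rest =>
    if p && (c == '0') && nextNonOp rest then gNorm p rest
    else c :: gNorm (isOp c) rest

theorem gNorm_zeros_nonop (k : Nat) (d : Char) (r : List Char)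
    (hd : isOp d = false) (h0 : d ≠ '0') :
    gNorm true (List.replicate k '0' ++ d :: r) = gNorm false (d :: r) := by
  induction k with
  | zero =>
    simp [gNorm, nextNonOp, h0, hd]
  | succ k ih =>
    rw [List.replicate_succ, List.cons_append, gNorm]
    have hnext : nextNonOp (List.replicate k '0' ++ d :: r) = true := by
      cases k with
      | zero => simp [nextNonOp, hd]
      | succ k => simp [List.replicate_succ, nextNonOp, isOp]
    simp [hnext, ih]

theorem gNorm_zeros_op (k : Nat) (hk : 0 < k) (d : Char) (r : List Char) (hd : isOp d = true) :
    gNorm true (List.replicate k '0' ++ d :: r) = '0' :: gNorm false (d :: r) := by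
  induction k with
  | zero => omega
  | succ k ih =>
    rw [List.replicate_succ, List.cons_append, gNorm]
    cases k with
    | zero =>
      have hne : nextNonOp (d :: r) = false := by simp [nextNonOp, hd]
      simp [gNorm, hne, isOp]
    | succ k =>
      have hnext : nextNonOp (List.replicate (k+1) '0' ++ d :: r) = true := by
        simp [List.replicate_succ, nextNonOp, isOp]
      simp [hnext, ih (by omega)]

theorem gNorm_zeros_end (k : Nat) (hk : 0 < k) :
    gNorm true (List.replicate k '0') = ['0'] := by
  induction k with
  | zero => omega
  | succ k ih =>
    rw [List.replicate_succ, gNorm]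
    cases k with
    | zero => simp [nextNonOp, gNorm]
    | succ k =>
      have hnext : nextNonOp (List.replicate (k+1) '0') = true := by
        simp [List.replicate_succ, nextNonOp, isOp]
      simp [hnext, ih (by omega)]

theorem skipZeros_spec (expr : List Char) (j : Int) (hj : 0 ≤ j) :
    skipZeros expr (expr.length) j
      = j + ((expr.drop j.toNat).takeWhile (fun c => c == '0')).length := by
  fun_induction skipZeros expr (expr.length) j with
  | case1 j h hz ih =>
    have hz' : PySem.List.pyGet? expr j = some '0' := by simpa using hz
    rw [PySem.List.pyGet?_of_nonneg expr hj, ← List.head?_drop] at hz'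
    obtain ⟨t, ht⟩ : ∃ t, expr.drop j.toNat = '0' :: t := by
      cases hd : expr.drop j.toNat with
      | nil => rw [hd] at hz'; simp at hz'
      | cons a t => rw [hd] at hz'; simp at hz'; exact ⟨t, by rw [hz']⟩
    have hdrop : expr.drop (j+1).toNat = t := by
      have : (j+1).toNat = j.toNat + 1 := by omega
      rw [this, ← List.drop_drop, ht]; simp
    rw [ih (by omega), hdrop, ht]
    simp; omega
  | case2 j h hz =>
    have hz' : ¬ PySem.List.pyGet? expr j = some '0' := by simpa using hz
    rw [PySem.List.pyGet?_of_nonneg expr hj, ← List.head?_drop] at hz'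
    cases hd : expr.drop j.toNat with
    | nil => simp
    | cons a t =>
      rw [hd] at hz'
      have hb : (a == '0') = false := by simpa using hz'
      simp [hb]
  | case3 j h =>
    have : expr.drop j.toNat = [] := by
      apply List.drop_eq_nil_of_le; omega
    simp [this]

theorem dropWhile_head_false (p : Char → Bool) (l : List Char) (d : Char) (r : List Char)
    (h : l.dropWhile p = d :: r) : p d = false := by
  have hne : l.dropWhile p ≠ [] := by simp [h]
  have := List.head_dropWhile_not p hne
  simp only [h, List.head_cons] at this
  exact this
theorem takeWhile_zero_replicate (t : List Char) :
    t.takeWhile (fun c => c == '0') = List.replicate (t.takeWhile (fun c => c == '0')).length '0' := by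
  induction t with
  | nil => simp
  | cons a t ih =>
    by_cases h : a = '0'
    · subst h; simpa [List.takeWhile_cons, List.replicate_succ] using ih
    · have hb : (a == '0') = false := by simpa using h
      simp [hb]

theorem gNorm_head_ne (p : Bool) (d : Char) (r : List Char) (h : (d == '0') = false) :
    gNorm p (d :: r) = gNorm false (d :: r) := by
  simp [gNorm, h]

theorem lemB (expr : List Char) (i : Int) (out : List Char) (hi : 0 ≤ i) :
    altLoop expr (expr.length) i out = out ++ gNorm false (expr.drop i.toNat) := by
  rw [altLoop]
  split
  case isFalse h =>
    have : expr.drop i.toNat = [] := List.drop_eq_nil_of_le (by omega)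
    simp [this, gNorm]
  case isTrue h =>
    -- current char
    obtain ⟨c, t, hct⟩ : ∃ c t, expr.drop i.toNat = c :: t := by
      cases hd : expr.drop i.toNat with
      | nil => exfalso; have := List.length_drop (l := expr) (i := i.toNat); rw [hd] at this; simp at this; omega
      | cons c t => exact ⟨c, t, rfl⟩
    have hget : PySem.List.pyGet? expr i = some c := by
      rw [PySem.List.pyGet?_of_nonneg expr hi, ← List.head?_drop, hct]; rfl
    simp only [hget, Option.getD_some]
    have hdrop1 : expr.drop (i+1).toNat = t := by
      have h1 : (i+1).toNat = i.toNat + 1 := by omega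
      rw [h1, ← List.drop_drop, hct]; simp
    by_cases hop : isOp c = true
    · simp only [hop, if_true]
      obtain ⟨k, hk⟩ : ∃ k, (t.takeWhile (fun c => c == '0')).length = k := ⟨_, rfl⟩
      obtain ⟨u, hu⟩ : ∃ u, t.dropWhile (fun c => c == '0') = u := ⟨_, rfl⟩
      have hj : skipZeros expr (expr.length) (i+1) = i + 1 + k := by
        rw [skipZeros_spec expr (i+1) (by omega), hdrop1, hk]
      obtain ⟨j, hjdef⟩ : ∃ j, skipZeros expr (expr.length) (i+1) = j := ⟨_, rfl⟩
      rw [hjdef] at hj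
      have htu : t = List.replicate k '0' ++ u := by
        conv_lhs => rw [← List.takeWhile_append_dropWhile (p := fun c => c == '0') (l := t)]
        rw [takeWhile_zero_replicate, hk, hu]
      have hkt : k ≤ t.length := by rw [← hk]; exact (List.takeWhile_sublist _).length_le
      have hit : i.toNat + 1 + t.length = expr.length := by
        have h2 := List.length_drop (l := expr) (i := i.toNat); rw [hct] at h2; simp at h2; omega
      have hdropj : expr.drop j.toNat = u := by
        have h3 : j.toNat = (i+1).toNat + k := by omega
        rw [h3, ← List.drop_drop, hdrop1, htu]
        simp
      have hgetj : PySem.List.pyGet? expr j = u.head? := by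
        rw [PySem.List.pyGet?_of_nonneg expr (by omega), ← List.head?_drop, hdropj]
      have hrhs : gNorm false (c :: t) = c :: gNorm true t := by
        simp [gNorm, hop]
      rw [hjdef, hct, hrhs]
      cases hucase : u with
      | cons d r =>
        have hd0 : (d == '0') = false := dropWhile_head_false _ t d r (by rw [hu, hucase])
        have hjlt : j < (expr.length : Int) := by
          have h4 := List.length_drop (l := expr) (i := j.toNat); rw [hdropj, hucase] at h4; simp at h4
          omega
        rw [hgetj, hucase]
        simp only [List.head?_cons, Option.map_some, Option.getD_some]
        by_cases hdop : isOp d = true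
        · -- next kept char is an operator: drop_all is false
          rw [if_neg (by simp [hdop])]
          by_cases hkpos : 0 < k
          · rw [if_pos (by omega)]
            rw [lemB expr j (out ++ [c] ++ ['0']) (by omega), hdropj, hucase]
            rw [htu, hucase, gNorm_zeros_op k hkpos d r hdop]
            simp
          · rw [if_neg (by omega)]
            rw [lemB expr j (out ++ [c]) (by omega), hdropj, hucase]
            have hk0 : k = 0 := by omega
            rw [htu, hucase, hk0]
            simp [gNorm_head_ne true d r hd0]
        · -- drop_all is true: the whole zero run disappears
          rw [if_pos (by simp [hjlt, hdop])]
          rw [lemB expr j (out ++ [c]) (by omega), hdropj, hucase]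
          rw [htu, hucase, gNorm_zeros_nonop k d r (by simpa using hdop) (by simpa using hd0)]
          simp
      | nil =>
        have hteq : t.length = k := by rw [htu, hucase]; simp
        have hjeq : j = (expr.length : Int) := by omega
        rw [hgetj, hucase]
        simp only [List.head?_nil, Option.map_none, Option.getD_none, Bool.not_true, Bool.and_false]
        rw [if_neg (by simp)]
        by_cases hkpos : 0 < k
        · rw [if_pos (by omega)]
          rw [lemB expr j (out ++ [c] ++ ['0']) (by omega)]
          rw [hdropj, hucase, htu, hucase, List.append_nil, gNorm_zeros_end k hkpos]
          simp [gNorm]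
        · rw [if_neg (by omega)]
          rw [lemB expr j (out ++ [c]) (by omega)]
          have hk0 : k = 0 := by omega
          rw [hdropj, hucase, htu, hucase, hk0]
          simp [gNorm]
    · simp only [hop, if_false, Bool.false_eq_true]
      rw [lemB expr (i+1) (out ++ [c]) (by omega), hdrop1, hct]
      have hopf : isOp c = false := by simpa using hop
      simp [gNorm, hopf]
termination_by (expr.length - i).toNat
decreasing_by
  · have := skipZeros_le expr (expr.length) (i+1); omega
  · have := skipZeros_le expr (expr.length) (i+1); omega
  · have := skipZeros_le expr (expr.length) (i+1); omega
  · have := skipZeros_le expr (expr.length) (i+1); omega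
  · have := skipZeros_le expr (expr.length) (i+1); omega
  · omega

theorem lemA (rest done : List Char) (hne : done ≠ []) :
    leftZeroLoop (done ++ rest) ((done.length : Int) + rest.length - 1) (done.length)
      = done ++ gNorm (((done.getLast?).map isOp).getD false) rest := by
  induction rest generalizing done with
  | nil =>
    rw [leftZeroLoop]
    rw [dif_neg (by simp)]
    simp [gNorm]
  | cons c rest ih =>
    cases rest with
    | nil =>
      rw [leftZeroLoop]
      rw [dif_neg (by simp)]
      simp [gNorm, nextNonOp]
    | cons d r =>
      obtain ⟨ds, x, hdx⟩ : ∃ ds x, done = ds ++ [x] := by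
        rcases List.eq_nil_or_concat done with h | ⟨ds, x, h⟩
        · exact absurd h hne
        · exact ⟨ds, x, by simpa using h⟩
      have hlast : done.getLast? = some x := by rw [hdx]; exact List.getLast?_concat
      have hget1 : PySem.List.pyGet? (done ++ c :: d :: r) ((done.length : Int) + 1) = some d := by
        have := PySem.List.pyGet?_append_right done (c :: d :: r) 1
        simpa using this
      have hget0 : PySem.List.pyGet? (done ++ c :: d :: r) ((done.length : Int)) = some c :=
        PySem.List.pyGet?_append_length done _ c
      have hgetm : PySem.List.pyGet? (done ++ c :: d :: r) ((done.length : Int) - 1) = some x := by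
        have h1 : ((done.length : Int) - 1) = (ds.length : Int) := by
          rw [hdx]; simp
        rw [h1, hdx, List.append_assoc]
        exact PySem.List.pyGet?_append_length ds _ x
      rw [leftZeroLoop]
      rw [dif_pos (by simp only [List.length_cons]; push_cast; omega)]
      rw [hget1, hget0, hgetm]
      by_cases hd : isOp d = true
      · -- skip branch: next char is an operator
        simp only [hd, Option.map_some, Option.getD_some, if_true]
        have hstep : (done.length : Int) + 1 = (((done ++ [c]).length : Int)) := by simp
        have hsz : (done.length : Int) + (c :: d :: r).length - 1
            = ((done ++ [c]).length : Int) + (d :: r).length - 1 := by simp only [List.length_append, List.length_cons, List.length_nil]; omega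
        rw [hstep, hsz, show done ++ c :: d :: r = (done ++ [c]) ++ (d :: r) by simp]
        rw [ih (done ++ [c]) (by simp)]
        have hl2 : (done ++ [c]).getLast? = some c := List.getLast?_concat
        rw [hl2]
        have : gNorm (((done.getLast?).map isOp).getD false) (c :: d :: r)
            = c :: gNorm (isOp c) (d :: r) := by
          rw [gNorm]
          rw [if_neg (by simp [nextNonOp, hd])]
        rw [this]
        simp
      · -- next char is not an operator
        have hdf : isOp d = false := by simpa using hd
        simp only [hdf, Option.map_some, Option.getD_some, Bool.false_eq_true, if_false]
        by_cases hdel : (c = '0' ∧ isOp x = true)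
        · -- delete branch
          obtain ⟨hc0, hx⟩ := hdel
          rw [if_pos (by simp [hc0, hx])]
          have hsl1 : PySem.List.slice (done ++ c :: d :: r) none (some (done.length : Int)) = done := by
            rw [PySem.List.slice_to_natCast, List.take_append]
            simp
          have hsl2 : PySem.List.slice (done ++ c :: d :: r) (some ((done.length : Int) + 1)) none = d :: r := by
            have h1 : (done.length : Int) + 1 = ((done.length + 1 : Nat) : Int) := by push_cast; ring
            rw [h1, PySem.List.slice_from_natCast, List.drop_append]
            simp
          rw [hsl1, hsl2]
          have hsz : (done.length : Int) + (c :: d :: r).length - 1 - 1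
              = (done.length : Int) + (d :: r).length - 1 := by simp only [List.length_cons]; omega
          rw [hsz, ih done hne]
          have : gNorm (((done.getLast?).map isOp).getD false) (c :: d :: r)
              = gNorm (((done.getLast?).map isOp).getD false) (d :: r) := by
            rw [gNorm, if_pos (by simp [hlast, hx, hc0, nextNonOp, hdf])]
          rw [this]
        · -- plain advance
          rw [if_neg (by intro hcontra; simp at hcontra; exact hdel ⟨hcontra.1, hcontra.2⟩)]
          have hstep : (done.length : Int) + 1 = (((done ++ [c]).length : Int)) := by simp
          have hsz : (done.length : Int) + (c :: d :: r).length - 1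
              = ((done ++ [c]).length : Int) + (d :: r).length - 1 := by simp only [List.length_append, List.length_cons, List.length_nil]; omega
          rw [hstep, hsz, show done ++ c :: d :: r = (done ++ [c]) ++ (d :: r) by simp]
          rw [ih (done ++ [c]) (by simp)]
          have hl2 : (done ++ [c]).getLast? = some c := List.getLast?_concat
          rw [hl2]
          have : gNorm (((done.getLast?).map isOp).getD false) (c :: d :: r)
              = c :: gNorm (isOp c) (d :: r) := by
            rw [gNorm]
            rw [if_neg (by rw [hlast]; simp [nextNonOp, hdf]; tauto)]
          rw [this]
          simp


-- ===== VERDICT (by name: the statement is the Claim_ definition above) =====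
theorem leftZero_spec : Claim_equal_leftZero := by
  intro expr _
  unfold Spec_leftZero leftZero leftZero_alt
  have hlen : PySem.Str.len expr = (expr.toList.length : Int) := by simp
  rw [hlen, lemB expr.toList 0 [] (by omega)]
  cases h : expr.toList with
  | nil => rw [leftZeroLoop]; simp [gNorm]
  | cons c r =>
    have hA := lemA r [c] (by simp)
    simp only [List.singleton_append, List.length_singleton] at hA
    push_cast at hA
    have hsz : ((c :: r).length : Int) - 1 = (1 : Int) + (r.length : Int) - 1 := by
      simp only [List.length_cons]; push_cast; omega
    rw [hsz, hA]
    simp [gNorm]
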